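-- pv_equiv track=rewrite | github.com/khanramjan/compiler_design | idenfyToken.py | tokenize_and_categorize
-- ===== SOURCE A (Python) =====
-- KEYWORDS = {'int', 'float', 'if', 'else', 'while', 'return'}
--
-- OPERATORS = {'+', '-', '*', '/', '=', '==', '!=', '&&', '||'}
--
-- SEPARATORS = {';', ',', '(', ')', '{', '}'}
--
-- def is_identifier(token):
--
--     if token and (token[0].isalpha() or token[0] == '_'):
--         return all(char.isalnum() or char == '_' for char in token[1:])
--     return False
--
-- def is_integer_literal(token):
--
--     return token.isdigit()
--
-- def is_float_literal(token):
--
--     if '.' in token: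
--         parts = token.split('.')
--         return len(parts) == 2 and all(part.isdigit() for part in parts)
--     return False
--
-- def is_string_literal(token):
--
--     return token.startswith('"') and token.endswith('"')
--
-- def categorize_token(token):
--     if token in KEYWORDS:
--         return f"{token} (keyword)"
--     elif token in OPERATORS:
--         return f"{token} (operator)"
--     elif token in SEPARATORS:
--         return f"{token} (separator)"
--     elif is_identifier(token):
--         return f"{token} (identifier)"
--     elif is_integer_literal(token):
--         return f"{token} (integer literal)"
--     elif is_float_literal(token):
--         return f"{token} (floating-point literal)"
--     elif is_string_literal(token):
--         return f"{token} (string literal)"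
--     return f"{token} (unknown)"
--
-- def tokenize_and_categorize(input_string):
--
--     tokens = []
--     current_token = ""
--
--     for char in input_string:
--         if char.isspace():
--             if current_token:
--                 tokens.append(current_token)
--                 current_token = ""
--         elif char in OPERATORS or char in SEPARATORS:
--             if current_token:
--                 tokens.append(current_token)
--                 current_token = ""
--             tokens.append(char)
--         else:
--             current_token += char
--
--     if current_token:
--         tokens.append(current_token)
--
--     categorized_tokens = [categorize_token(token) for token in tokens]
--     return categorized_tokens
-- ===== SOURCE B (Python) =====
-- DELIMS = set('+-*/=;,(){}')
--
-- TABLE = (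
--     ({'int', 'float', 'if', 'else', 'while', 'return'}, 'keyword'),
--     ({'+', '-', '*', '/', '=', '==', '!=', '&&', '||'}, 'operator'),
--     ({';', ',', '(', ')', '{', '}'}, 'separator'),
-- )
--
--
-- def token_category(token):
--     # fixed vocabulary first, via a table scan instead of three separate branches
--     for group, cat in TABLE:
--         if token in group:
--             return cat
--     head = token[:1]
--     if (head.isalpha() or head == '_') and all(c.isalnum() or c == '_' for c in token[1:]):
--         return 'identifier'
--     if token.isdigit():
--         return 'integer literal'
--     before, dot, after = token.partition('.')
--     if dot and before.isdigit() and after.isdigit():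
--         return 'floating-point literal'
--     if token[:1] == '"' and token[-1:] == '"':
--         return 'string literal'
--     return 'unknown'
--
--
-- def tokenize_and_categorize(input_string):
--     # pad every delimiter with spaces, then let str.split() do the tokenizing
--     spaced = ''.join(' ' + c + ' ' if c in DELIMS else c for c in input_string)
--     return ['%s (%s)' % (t, token_category(t)) for t in spaced.split()]
-- ===== Notes on version B (the rewrite author's own statement) =====
-- stated objective: idiomatic
-- what changed: B tokenizes by padding each single-char delimiter with spaces and letting str.split() cut the string, instead of A's char-by-char accumulator loop, and categorizes via a (token-set, category) table scan plus inline checks using slices and str.partition in place of A's chain of helper predicates.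
import Mathlib
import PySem

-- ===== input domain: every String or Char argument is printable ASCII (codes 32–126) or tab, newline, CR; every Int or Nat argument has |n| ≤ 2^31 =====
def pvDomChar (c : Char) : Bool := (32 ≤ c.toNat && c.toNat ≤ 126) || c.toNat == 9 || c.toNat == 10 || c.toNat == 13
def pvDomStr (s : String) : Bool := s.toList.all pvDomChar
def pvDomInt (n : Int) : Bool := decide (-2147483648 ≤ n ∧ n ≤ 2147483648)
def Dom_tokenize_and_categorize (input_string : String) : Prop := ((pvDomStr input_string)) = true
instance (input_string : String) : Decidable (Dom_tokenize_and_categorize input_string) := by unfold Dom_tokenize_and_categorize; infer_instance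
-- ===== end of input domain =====

-- B pads each one-char delimiter with spaces and tokenizes with str.split(), and categorizes via a
-- table scan plus inline slice/partition checks, instead of A's accumulator loop and helper chain
-- (alternative/idiomatic decomposition, same cost).

-- ===== PORT A =====
-- module constants of Source A (strings handled as List Char via PySem.Chars)
def pvKeywords : List (List Char) :=
  [['i','n','t'], ['f','l','o','a','t'], ['i','f'], ['e','l','s','e'], ['w','h','i','l','e'], ['r','e','t','u','r','n']]
def pvOperators : List (List Char) :=
  [['+'], ['-'], ['*'], ['/'], ['='], ['=','='], ['!','='], ['&','&'], ['|','|']]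
def pvSeparators : List (List Char) := [[';'], [','], ['('], [')'], ['{'], ['}']]

def pv_is_identifier (token : List Char) : Bool :=
  if !token.isEmpty && (PySem.Chars.isalpha (token.headD ' ') || token.headD ' ' == '_') then
    (token.drop 1).all (fun c => PySem.Chars.isalnum c || c == '_')
  else false

def pv_is_integer_literal (token : List Char) : Bool := PySem.Chars.strIsdigit token

def pv_is_float_literal (token : List Char) : Bool :=
  if PySem.Chars.isIn ['.'] token then
    let parts := PySem.Chars.splitOn token ['.']
    parts.length == 2 && parts.all PySem.Chars.strIsdigit
  else false

def pv_is_string_literal (token : List Char) : Bool :=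
  PySem.Chars.startswith token ['"'] && PySem.Chars.endswith token ['"']

def pv_categorize_token (token : List Char) : List Char :=
  if pvKeywords.contains token then token ++ " (keyword)".toList
  else if pvOperators.contains token then token ++ " (operator)".toList
  else if pvSeparators.contains token then token ++ " (separator)".toList
  else if pv_is_identifier token then token ++ " (identifier)".toList
  else if pv_is_integer_literal token then token ++ " (integer literal)".toList
  else if pv_is_float_literal token then token ++ " (floating-point literal)".toList
  else if pv_is_string_literal token then token ++ " (string literal)".toList
  else token ++ " (unknown)".toList

-- one iteration of A's for-loop: state = (tokens, current_token)
def pvStepA (st : List (List Char) × List Char) (c : Char) : List (List Char) × List Char :=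
  if PySem.Chars.isspace c then
    (if st.2.isEmpty then st.1 else st.1 ++ [st.2], [])
  else if pvOperators.contains [c] || pvSeparators.contains [c] then
    ((if st.2.isEmpty then st.1 else st.1 ++ [st.2]) ++ [[c]], [])
  else
    (st.1, st.2 ++ [c])

-- run A's loop from a state, then flush the trailing current_token
def pvRunA (s : List Char) (st : List (List Char) × List Char) : List (List Char) :=
  let r := s.foldl pvStepA st
  if r.2.isEmpty then r.1 else r.1 ++ [r.2]

def tokenize_and_categorize (input_string : String) : List String :=
  (pvRunA input_string.toList ([], [])).map (fun t => String.ofList (pv_categorize_token t))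

-- ===== PORT B =====
-- Source B's module constants: the delimiter char set and the (token set, category) table
def pvDelimsB : List Char := "+-*/=;,(){}".toList
def pvTableB : List (List (List Char) × List Char) :=
  [ ((["int", "float", "if", "else", "while", "return"] : List String).map String.toList, "keyword".toList),
    ((["+", "-", "*", "/", "=", "==", "!=", "&&", "||"] : List String).map String.toList, "operator".toList),
    (([";", ",", "(", ")", "{", "}"] : List String).map String.toList, "separator".toList) ]

-- ' ' + c + ' ' if c in DELIMS else c, joined over the whole string
def pvSpaced (s : List Char) : List Char :=
  s.flatMap (fun c => if pvDelimsB.contains c then [' ', c, ' '] else [c])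

-- token.partition('.'): split at the FIRST '.', flag says whether one was found
-- (hand port of str.partition: PySem has no partition primitive; exact for a 1-char separator)
def pvPartitionDot (t : List Char) : List Char × Bool × List Char :=
  match t.dropWhile (· != '.') with
  | [] => (t, false, [])
  | _ :: rest => (t.takeWhile (· != '.'), true, rest)

-- Source B's token_category: table scan for the fixed vocabulary, then the inline literal checks
def pvTokenCategory (t : List Char) : List Char :=
  match pvTableB.findSome? (fun g => if g.1.contains t then some g.2 else none) with
  | some cat => cat
  | none =>
    let head := PySem.List.slice t none (some 1)
    if (PySem.Chars.strIsalpha head || head == ['_']) &&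
        (PySem.List.slice t (some 1) none).all (fun c => PySem.Chars.isalnum c || c == '_') then
      "identifier".toList
    else if PySem.Chars.strIsdigit t then "integer literal".toList
    else
      let p := pvPartitionDot t
      if p.2.1 && PySem.Chars.strIsdigit p.1 && PySem.Chars.strIsdigit p.2.2 then
        "floating-point literal".toList
      else if PySem.List.slice t none (some 1) == ['"'] && PySem.List.slice t (some (-1)) none == ['"'] then
        "string literal".toList
      else "unknown".toList

def tokenize_and_categorize_alt (input_string : String) : List String :=
  (PySem.Chars.split₀ (pvSpaced input_string.toList)).map
    (fun t => String.ofList (t ++ " (".toList ++ pvTokenCategory t ++ [')']))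

-- ===== PRECONDITION & SPEC =====
def Spec_tokenize_and_categorize (input_string : String) (out : List String) : Prop := out = tokenize_and_categorize_alt input_string
instance (input_string : String) (out : List String) : Decidable (Spec_tokenize_and_categorize input_string out) := by unfold Spec_tokenize_and_categorize; infer_instance

-- ===== CLAIM (what is proved, stated in full; the proofs are below) =====
def Claim_equal_tokenize_and_categorize : Prop := ∀ (input_string : String), Dom_tokenize_and_categorize input_string → Spec_tokenize_and_categorize input_string (tokenize_and_categorize input_string)

-- ===== LEMMAS AND PROOFS =====

-- the delimiter string as an explicit char list
lemma pvDelimsB_eq : pvDelimsB = ['+','-','*','/','=',';',',','(',')','{','}'] := by decide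

-- A's single-char delimiter test coincides with B's delimiter string
lemma pv_delim_eq (c : Char) :
    (pvOperators.contains [c] || pvSeparators.contains [c]) = pvDelimsB.contains c := by
  rw [Bool.eq_iff_iff, pvDelimsB_eq]
  simp only [pvOperators, pvSeparators, List.contains_eq_mem, Bool.or_eq_true,
    decide_eq_true_eq, List.mem_cons, List.not_mem_nil, or_false, List.cons.injEq, and_true,
    reduceCtorEq, and_false]
  tauto

-- a delimiter char is never whitespace
lemma pv_delim_not_space (c : Char) (h : pvDelimsB.contains c = true) :
    PySem.Chars.isspace c = false := by
  rw [pvDelimsB_eq] at h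
  simp only [List.contains_eq_mem, decide_eq_true_eq, List.mem_cons, List.not_mem_nil,
    or_false] at h
  rcases h with rfl|rfl|rfl|rfl|rfl|rfl|rfl|rfl|rfl|rfl|rfl <;> decide

-- unfolding equations for str.split()'s worker
lemma pv_go_nil (cur : List Char) (acc : List (List Char)) :
    PySem.Chars.split₀.go [] cur acc =
      if cur.isEmpty then acc.reverse else (cur.reverse :: acc).reverse := rfl

lemma pv_go_cons (c : Char) (l cur : List Char) (acc : List (List Char)) :
    PySem.Chars.split₀.go (c::l) cur acc =
      if PySem.Chars.isspace c then
        (if cur.isEmpty then PySem.Chars.split₀.go l [] acc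
         else PySem.Chars.split₀.go l [] (cur.reverse :: acc))
      else PySem.Chars.split₀.go l (c :: cur) acc := rfl

lemma pv_space_space : PySem.Chars.isspace ' ' = true := by decide

-- loop invariant: A's loop from state (toks, cur) equals str.split()'s worker on the padded remainder
lemma pv_runA_eq_split (s : List Char) : ∀ (toks : List (List Char)) (cur : List Char),
    pvRunA s (toks, cur) = PySem.Chars.split₀.go (pvSpaced s) cur.reverse toks.reverse := by
  induction s with
  | nil =>
    intro toks cur
    cases cur <;> simp [pvRunA, pvSpaced, pv_go_nil]
  | cons c rest ih =>
    intro toks cur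
    have hstep : pvRunA (c :: rest) (toks, cur) = pvRunA rest (pvStepA (toks, cur) c) := rfl
    have hpad : pvSpaced (c :: rest) =
        (if pvDelimsB.contains c then [' ', c, ' '] else [c]) ++ pvSpaced rest := by
      simp [pvSpaced]
    rw [hstep, hpad]
    by_cases hs : PySem.Chars.isspace c = true
    · have hd : pvDelimsB.contains c = false := by
        cases hcd : pvDelimsB.contains c with
        | false => rfl
        | true => rw [pv_delim_not_space c hcd] at hs; cases hs
      have h1 : pvStepA (toks, cur) c = ((if cur.isEmpty then toks else toks ++ [cur]), []) := by
        unfold pvStepA; rw [if_pos hs]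
      have hdm : c ∉ pvDelimsB := by simpa using hd
      rw [h1, ih]
      cases cur <;> simp [hdm, pv_go_cons, hs]
    · by_cases hd : pvDelimsB.contains c = true
      · have hd' : (pvOperators.contains [c] || pvSeparators.contains [c]) = true := by
          rw [pv_delim_eq]; exact hd
        have hns : PySem.Chars.isspace c = false := pv_delim_not_space c hd
        have h1 : pvStepA (toks, cur) c =
            ((if cur.isEmpty then toks else toks ++ [cur]) ++ [[c]], []) := by
          unfold pvStepA; rw [if_neg hs, hd', if_pos rfl]
        have hdm : c ∈ pvDelimsB := by simpa using hd
        rw [h1, ih]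
        cases cur <;> simp [hdm, pv_go_cons, hns, pv_space_space]
      · have hd' : (pvOperators.contains [c] || pvSeparators.contains [c]) = false := by
          rw [pv_delim_eq]; simpa using hd
        have hns : PySem.Chars.isspace c = false := by simpa using hs
        have h1 : pvStepA (toks, cur) c = (toks, cur ++ [c]) := by
          unfold pvStepA; rw [if_neg hs, hd', if_neg Bool.false_ne_true]
        have hdm : c ∉ pvDelimsB := by simpa using hd
        rw [h1, ih]
        simp [hdm, pv_go_cons, hns]

-- Source B's table written with A's constant lists
lemma pvTableB_eq : pvTableB =
    [(pvKeywords, "keyword".toList), (pvOperators, "operator".toList),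
     (pvSeparators, "separator".toList)] := by decide

-- the identifier checks agree
lemma pv_ident_eq (t : List Char) :
    pv_is_identifier t =
      ((PySem.Chars.strIsalpha (PySem.List.slice t none (some 1)) ||
          PySem.List.slice t none (some 1) == ['_']) &&
        (PySem.List.slice t (some 1) none).all (fun c => PySem.Chars.isalnum c || c == '_')) := by
  have h1 : PySem.List.slice t none (some 1) = t.take 1 := PySem.List.slice_to t (by norm_num)
  have h2 : PySem.List.slice t (some 1) none = t.drop 1 := PySem.List.slice_from t (by norm_num)
  cases t with
  | nil => simp [pv_is_identifier, h1, h2, PySem.Chars.strIsalpha]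
  | cons c cs =>
    simp only [h1, h2]
    by_cases hc : c = '_'
    · subst hc; simp [pv_is_identifier, PySem.Chars.strIsalpha]
    · have hcb : (c == '_') = false := by simpa using hc
      simp [pv_is_identifier, PySem.Chars.strIsalpha, hcb]

-- unfolding equations for the str.split(sep) worker, sep = "."
lemma pv_sgo_zero (l cur : List Char) (acc : List (List Char)) :
    PySem.Chars.splitOn.go ['.'] 0 l cur acc = ((cur.reverse ++ l) :: acc).reverse := rfl

lemma pv_sgo_nil (fuel : Nat) (cur : List Char) (acc : List (List Char)) :
    PySem.Chars.splitOn.go ['.'] (fuel + 1) [] cur acc = (cur.reverse :: acc).reverse := rfl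

lemma pv_sgo_cons (fuel : Nat) (c : Char) (rest cur : List Char) (acc : List (List Char)) :
    PySem.Chars.splitOn.go ['.'] (fuel + 1) (c :: rest) cur acc =
      if ['.'].isPrefixOf (c :: rest) then
        PySem.Chars.splitOn.go ['.'] fuel (List.drop 1 (c :: rest)) [] (cur.reverse :: acc)
      else PySem.Chars.splitOn.go ['.'] fuel rest (c :: cur) acc := rfl

-- no separator left: the worker returns the remainder as the last piece (any fuel)
lemma pv_sgo_no_dot (l : List Char) (h : '.' ∉ l) : ∀ (fuel : Nat) (cur : List Char)
    (acc : List (List Char)),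
    PySem.Chars.splitOn.go ['.'] fuel l cur acc = ((cur.reverse ++ l) :: acc).reverse := by
  induction l with
  | nil => intro fuel cur acc; cases fuel <;> simp [pv_sgo_zero, pv_sgo_nil]
  | cons c rest ih =>
    intro fuel cur acc
    have hc : c ≠ '.' := fun hc => h (hc ▸ List.mem_cons_self)
    have hrest : '.' ∉ rest := fun hm => h (List.mem_cons_of_mem _ hm)
    cases fuel with
    | zero => exact pv_sgo_zero _ _ _
    | succ fuel =>
      rw [pv_sgo_cons]
      have hp : ['.'].isPrefixOf (c :: rest) = false := by
        simp [List.isPrefixOf]; exact fun h' => hc h'.symm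
      rw [hp]
      simp only [Bool.false_eq_true, if_false]
      rw [ih hrest]
      simp

-- stepping over a dot-free prefix up to the first '.'
lemma pv_sgo_dot (b : List Char) (hb : '.' ∉ b) : ∀ (fuel : Nat) (a cur : List Char)
    (acc : List (List Char)), b.length < fuel →
    PySem.Chars.splitOn.go ['.'] fuel (b ++ '.' :: a) cur acc =
      PySem.Chars.splitOn.go ['.'] (fuel - (b.length + 1)) a [] ((cur.reverse ++ b) :: acc) := by
  induction b with
  | nil =>
    intro fuel a cur acc hf
    cases fuel with
    | zero => omega
    | succ fuel =>
      rw [List.nil_append, pv_sgo_cons]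
      have hp : ['.'].isPrefixOf ('.' :: a) = true := by simp [List.isPrefixOf]
      rw [hp]
      simp
  | cons c b' ih =>
    intro fuel a cur acc hf
    have hc : c ≠ '.' := fun hc => hb (hc ▸ List.mem_cons_self)
    have hb' : '.' ∉ b' := fun hm => hb (List.mem_cons_of_mem _ hm)
    cases fuel with
    | zero => omega
    | succ fuel =>
      rw [List.cons_append, pv_sgo_cons]
      have hp : ['.'].isPrefixOf (c :: (b' ++ '.' :: a)) = false := by
        simp [List.isPrefixOf]; exact fun h' => hc h'.symm
      rw [hp]
      simp only [Bool.false_eq_true, if_false]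
      rw [ih hb' fuel a (c :: cur) acc (by simpa using Nat.lt_of_succ_lt_succ hf)]
      have hfu : fuel + 1 - ((c :: b').length + 1) = fuel - (b'.length + 1) := by
        simp only [List.length_cons]; omega
      rw [hfu]
      congr 1
      simp

-- the worker returns at least acc + 1 pieces
lemma pv_sgo_len : ∀ (fuel : Nat) (l cur : List Char) (acc : List (List Char)),
    acc.length + 1 ≤ (PySem.Chars.splitOn.go ['.'] fuel l cur acc).length := by
  intro fuel
  induction fuel with
  | zero => intro l cur acc; simp [pv_sgo_zero]
  | succ fuel ih =>
    intro l cur acc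
    cases l with
    | nil => simp [pv_sgo_nil]
    | cons c rest =>
      rw [pv_sgo_cons]
      by_cases hp : ['.'].isPrefixOf (c :: rest) = true
      · rw [hp]; simp only [if_true]
        calc acc.length + 1 ≤ (cur.reverse :: acc).length + 1 := by simp
          _ ≤ _ := ih _ _ _
      · rw [Bool.not_eq_true] at hp
        rw [hp]
        simp only [Bool.false_eq_true, if_false]
        exact ih _ _ _

-- a string containing '.' is not all digits
lemma pv_dot_not_digits (a : List Char) (h : '.' ∈ a) : PySem.Chars.strIsdigit a = false := by
  simp only [PySem.Chars.strIsdigit, Bool.and_eq_false_iff, List.all_eq_false]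
  right; exact ⟨'.', h, by decide⟩

-- chars of a takeWhile satisfy the predicate
lemma pv_mem_takeWhile {p : Char → Bool} {l : List Char} {x : Char}
    (h : x ∈ l.takeWhile p) : p x = true := by
  induction l with
  | nil => simp at h
  | cons c rest ih =>
    by_cases hc : p c = true
    · rw [List.takeWhile_cons_of_pos hc] at h
      rcases List.mem_cons.1 h with rfl | h'
      · exact hc
      · exact ih h'
    · rw [List.takeWhile_cons_of_neg (by simpa using hc)] at h
      simp at h

-- a dot-free list is taken whole / dropped to nothing by takeWhile/dropWhile (≠ '.')
lemma pv_dropWhile_no_dot (l : List Char) (h : '.' ∉ l) : l.dropWhile (· != '.') = [] := by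
  induction l with
  | nil => rfl
  | cons c rest ih =>
    have hc : c ≠ '.' := fun hc => h (hc ▸ List.mem_cons_self)
    rw [List.dropWhile_cons_of_pos (by simpa using hc)]
    exact ih fun hm => h (List.mem_cons_of_mem _ hm)

-- decomposition of a list containing '.' at its first dot
lemma pv_dot_split (t : List Char) (hm : '.' ∈ t) :
    ∃ a, t = t.takeWhile (· != '.') ++ '.' :: a ∧ '.' ∉ t.takeWhile (· != '.') ∧
      t.dropWhile (· != '.') = '.' :: a := by
  have hb : '.' ∉ t.takeWhile (· != '.') := fun hmem => by
    have := pv_mem_takeWhile hmem; simp at this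
  have hd : t.dropWhile (· != '.') ≠ [] := by
    intro hnil
    have h2 : List.takeWhile (fun x => x != '.') t = t := by
      conv_rhs => rw [← List.takeWhile_append_dropWhile (p := fun x => x != '.') (l := t)]
      rw [hnil, List.append_nil]
    exact hb (by rw [h2]; exact hm)
  obtain ⟨c, a, hca⟩ := List.exists_cons_of_ne_nil hd
  have hc : c = '.' := by
    have h0 := List.head?_dropWhile_not (· != '.') t
    rw [hca] at h0
    simpa using h0
  subst hc
  exact ⟨a, by conv_lhs => rw [← List.takeWhile_append_dropWhile (p := (· != '.')) (l := t), hca]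
        , hb, hca⟩

-- the float checks agree
lemma pv_float_eq (t : List Char) :
    pv_is_float_literal t =
      ((pvPartitionDot t).2.1 && PySem.Chars.strIsdigit (pvPartitionDot t).1 &&
        PySem.Chars.strIsdigit (pvPartitionDot t).2.2) := by
  by_cases hm : '.' ∈ t
  · obtain ⟨a, ht, hbfree, hdw⟩ := pv_dot_split t hm
    set b := t.takeWhile (fun x => x != '.') with hbdef
    have hlen : t.length = b.length + 1 + a.length := by rw [ht]; simp; omega
    have hin : PySem.Chars.isIn ['.'] t = true := by
      rw [PySem.Chars.isIn_iff_infix]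
      exact ⟨b, a, by rw [ht]; simp⟩
    have hpart : pvPartitionDot t = (b, true, a) := by
      unfold pvPartitionDot
      rw [hdw]
    have hsp : PySem.Chars.splitOn t ['.'] =
        PySem.Chars.splitOn.go ['.'] (a.length + 1) a [] [b] := by
      show PySem.Chars.splitOn.go ['.'] (t.length + 1) t [] [] = _
      conv_lhs => rw [ht]
      rw [pv_sgo_dot _ hbfree _ _ _ _ (by simp)]
      congr 1
      simp only [List.length_append, List.length_cons]
      omega
    unfold pv_is_float_literal
    rw [hin]
    simp only [if_true]
    by_cases hma : '.' ∈ a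
    · obtain ⟨a2, hta, hb2free, _⟩ := pv_dot_split a hma
      set b2 := a.takeWhile (fun x => x != '.') with hb2def
      have hta_le : b2.length ≤ a.length := (List.takeWhile_sublist _).length_le
      have hlen3 : 3 ≤ (PySem.Chars.splitOn t ['.']).length := by
        rw [hsp]
        conv_rhs => rw [hta]
        rw [pv_sgo_dot _ hb2free _ _ _ _ (by simp)]
        have h := pv_sgo_len ((b2 ++ '.' :: a2).length + 1 - (b2.length + 1)) a2 []
          [List.reverse [] ++ b2, b]
        simpa using h
      have h2 : ((PySem.Chars.splitOn t ['.']).length == 2) = false := by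
        have : (PySem.Chars.splitOn t ['.']).length ≠ 2 := by omega
        simpa using this
      have hda : PySem.Chars.strIsdigit a = false := pv_dot_not_digits a hma
      simp [h2, hpart, hda]
    · have hgo := pv_sgo_no_dot a hma (a.length + 1) [] [b]
      have hsp2 : PySem.Chars.splitOn t ['.'] = [b, a] := by
        rw [hsp, hgo]; simp
      rw [hsp2, hpart]
      simp
  · have hin : PySem.Chars.isIn ['.'] t = false := by
      rw [← Bool.not_eq_true, PySem.Chars.isIn_iff_infix]
      intro hinf
      exact hm (hinf.subset (by simp))
    have hdw := pv_dropWhile_no_dot t hm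
    unfold pv_is_float_literal pvPartitionDot
    rw [hdw, hin]
    simp

-- the string-literal checks agree
lemma pv_string_eq (t : List Char) :
    pv_is_string_literal t =
      (PySem.List.slice t none (some 1) == ['"'] && PySem.List.slice t (some (-1)) none == ['"']) := by
  cases t with
  | nil => decide
  | cons c cs =>
    rcases hr : (c :: cs).reverse with _ | ⟨d, r⟩
    · exact absurd hr (by simp)
    · have ht : c :: cs = r.reverse ++ [d] := by
        have h2 := congrArg List.reverse hr
        simpa using h2
      have h1 : PySem.List.slice (c :: cs) none (some 1) = [c] := by
        rw [PySem.List.slice_to _ (by norm_num)]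
        simp
      have hsl : PySem.List.slice (c :: cs) (some (-1)) none = [d] := by
        rw [ht]
        unfold PySem.List.slice PySem.List.clampIdx
        simp
        split <;> omega
      have hsw : PySem.Chars.startswith (c :: cs) ['"'] = (c == '"') := by
        simp [PySem.Chars.startswith, List.isPrefixOf, eq_comm]
      have hes : PySem.Chars.endswith (c :: cs) ['"'] = (d == '"') := by
        simp [PySem.Chars.endswith, List.isSuffixOf, hr, List.isPrefixOf, eq_comm]
      unfold pv_is_string_literal
      rw [hsw, hes, h1, hsl]
      simp

-- categorization agrees token by token
lemma pv_cat_eq (t : List Char) :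
    pv_categorize_token t = t ++ " (".toList ++ pvTokenCategory t ++ [')'] := by
  have e1 : " (keyword)".toList = " (".toList ++ "keyword".toList ++ [')'] := by decide
  have e2 : " (operator)".toList = " (".toList ++ "operator".toList ++ [')'] := by decide
  have e3 : " (separator)".toList = " (".toList ++ "separator".toList ++ [')'] := by decide
  have e4 : " (identifier)".toList = " (".toList ++ "identifier".toList ++ [')'] := by decide
  have e5 : " (integer literal)".toList = " (".toList ++ "integer literal".toList ++ [')'] := by
    decide
  have e6 : " (floating-point literal)".toList =
      " (".toList ++ "floating-point literal".toList ++ [')'] := by decide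
  have e7 : " (string literal)".toList = " (".toList ++ "string literal".toList ++ [')'] := by
    decide
  have e8 : " (unknown)".toList = " (".toList ++ "unknown".toList ++ [')'] := by decide
  have hfs : pvTableB.findSome? (fun g => if g.1.contains t then some g.2 else none) =
      if pvKeywords.contains t then some ("keyword".toList)
      else if pvOperators.contains t then some ("operator".toList)
      else if pvSeparators.contains t then some ("separator".toList) else none := by
    rw [pvTableB_eq]
    simp [List.findSome?]
    split_ifs <;> rfl
  simp only [pv_categorize_token, pvTokenCategory, pv_is_integer_literal]
  rw [hfs, ← pv_ident_eq, ← pv_float_eq, ← pv_string_eq]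
  split_ifs <;> simp [e1, e2, e3, e4, e5, e6, e7, e8]

-- ===== VERDICT (by name: the statement is the Claim_ definition above) =====
theorem tokenize_and_categorize_spec : Claim_equal_tokenize_and_categorize := by
  intro s _
  unfold Spec_tokenize_and_categorize tokenize_and_categorize tokenize_and_categorize_alt
  have h1 : pvRunA s.toList ([], []) = PySem.Chars.split₀ (pvSpaced s.toList) := by
    rw [pv_runA_eq_split]; rfl
  rw [h1]
  refine List.map_congr_left (fun t _ => ?_)
  rw [pv_cat_eq]
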